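-- pv_equiv track=rewrite | github.com/nathan-cairns/CBT | scripts/evaluate.py | remove_last_lines
-- ===== SOURCE A (Python) =====
-- def remove_last_lines(program, num_lines):
--     """Removes the last n lines which contain code"""
--     content = program.split('\n')
--     removed_lines = []
--     removed_counter = 0
--     for i, line in reversed(list(enumerate(content))):
--         if line.strip() and line.strip() != '}':
--             removed_counter = removed_counter + 1
--             removed_lines.append(content[i].strip())
--
--         del content[i]
--
--         if removed_counter == num_lines:
--             break
--
--     return content, removed_lines
-- ===== SOURCE B (Python) =====
-- def remove_last_lines(program, num_lines):
--     """Removes the last n lines which contain code"""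
--     content = program.split('\n')
--     cut = 0
--     count = 0
--     for i in range(len(content) - 1, -1, -1):
--         s = content[i].strip()
--         if s and s != '}':
--             count += 1
--         if count == num_lines:
--             cut = i
--             break
--     return content[:cut], [l.strip() for l in reversed(content[cut:])
--                            if l.strip() and l.strip() != '}']
-- ===== Notes on version B (the rewrite author's own statement) =====
-- stated objective: simpler
-- what changed: Replaces A's interleaved delete-and-collect loop over reversed(enumerate(content)) with a boundary pass that only finds the cut index, followed by a slice for the kept lines and a comprehension for the removed ones.
import Mathlib
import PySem

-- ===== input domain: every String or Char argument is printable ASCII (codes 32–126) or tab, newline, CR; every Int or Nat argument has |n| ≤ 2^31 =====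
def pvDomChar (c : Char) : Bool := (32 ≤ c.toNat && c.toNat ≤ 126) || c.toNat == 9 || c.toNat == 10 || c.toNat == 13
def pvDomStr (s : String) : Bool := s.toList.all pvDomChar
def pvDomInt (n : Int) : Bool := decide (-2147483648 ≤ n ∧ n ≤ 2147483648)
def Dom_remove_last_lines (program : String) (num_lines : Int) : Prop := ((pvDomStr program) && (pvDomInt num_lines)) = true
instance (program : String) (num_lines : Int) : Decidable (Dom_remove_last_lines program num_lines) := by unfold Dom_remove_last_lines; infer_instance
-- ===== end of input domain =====

-- B replaces A's interleaved delete-and-collect loop with a boundary pass (find the cut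
-- index) plus a slice and a comprehension: objective = simpler decomposition.

-- ===== PORT A =====
-- shared "is a code line" test: stripped non-empty and not '}'
def pvIsCode (l : String) : Bool := (PySem.Str.strip l != "") && (PySem.Str.strip l != "}")

-- the for-loop of A: state = (content, removed_lines, removed_counter)
def pvLoopA (pairs : List (Int × String)) (content removed : List String)
    (counter num_lines : Int) : List String × List String :=
  match pairs with
  | [] => (content, removed)
  | (i, line) :: rest =>
    let st :=
      if pvIsCode line then
        (counter + 1, removed ++ [PySem.Str.strip ((PySem.List.pyGet? content i).getD "")])
      else (counter, removed)
    let content' := ((PySem.List.pop? content i).map Prod.snd).getD content  -- del content[i]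
    if st.1 = num_lines then (content', st.2)
    else pvLoopA rest content' st.2 st.1 num_lines

def remove_last_lines (program : String) (num_lines : Int) : List String × List String :=
  let content := (PySem.Str.split? program "\n").getD []
  pvLoopA (PySem.List.enumerate content).reverse content [] 0 num_lines

-- ===== PORT B =====
-- boundary pass of B: scan indices from the end, count code lines, stop where count == num_lines
def pvFindCut (idxs : List Int) (content : List String) (count num_lines : Int) : Int :=
  match idxs with
  | [] => 0
  | i :: rest =>
    let count' := if pvIsCode ((PySem.List.pyGet? content i).getD "") then count + 1 else count
    if count' = num_lines then i else pvFindCut rest content count' num_lines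

def remove_last_lines_alt (program : String) (num_lines : Int) : List String × List String :=
  let content := (PySem.Str.split? program "\n").getD []
  let cut := pvFindCut (PySem.List.pyRange ((content.length : Int) - 1) (-1) (-1)) content 0 num_lines
  (PySem.List.slice content none (some cut),
   ((PySem.List.slice content (some cut) none).reverse.filter pvIsCode).map PySem.Str.strip)

-- ===== PRECONDITION & SPEC =====
def Spec_remove_last_lines (program : String) (num_lines : Int) (out : List String × List String) : Prop := out = remove_last_lines_alt program num_lines
instance (program : String) (num_lines : Int) (out : List String × List String) : Decidable (Spec_remove_last_lines program num_lines out) := by unfold Spec_remove_last_lines; infer_instance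

-- ===== CLAIM (what is proved, stated in full; the proofs are below) =====
def Claim_equal_remove_last_lines : Prop := ∀ (program : String) (num_lines : Int), Dom_remove_last_lines program num_lines → Spec_remove_last_lines program num_lines (remove_last_lines program num_lines)

-- ===== LEMMAS AND PROOFS =====

-- [k-1, k-2, …, 0] as Ints
def pvDownIdxs : Nat → List Int
  | 0 => []
  | k+1 => ((k : Int)) :: pvDownIdxs k

-- reversed(list(enumerate(c))) restricted to the first k entries, built structurally
def pvRevPairs (c : List String) : Nat → List (Int × String)
  | 0 => []
  | k+1 => (((k : Int)), (PySem.List.pyGet? c (k : Int)).getD "") :: pvRevPairs c k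

lemma pvRange_eq_downIdxs (k : Nat) :
    PySem.List.pyRange ((k : Int) - 1) (-1) (-1) = pvDownIdxs k := by
  induction k with
  | zero => simp [pvDownIdxs, PySem.List.pyRange_neg_one_eq_nil]
  | succ k ih =>
      rw [show ((k + 1 : Nat) : Int) - 1 = (k : Int) by push_cast; ring]
      rw [PySem.List.pyRange_neg_one_cons (by omega)]
      rw [ih]
      rfl

lemma pvEnum_append (xs ys : List String) (s : Int) :
    PySem.List.enumerate (xs ++ ys) s
      = PySem.List.enumerate xs s ++ PySem.List.enumerate ys (s + xs.length) := by
  induction xs generalizing s with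
  | nil => simp [PySem.List.enumerate_nil]
  | cons x xs ih =>
      simp [PySem.List.enumerate_cons, ih]
      ring_nf

lemma pvRevPairs_append (c : List String) (y : String) (k : Nat) (hk : k ≤ c.length) :
    pvRevPairs (c ++ [y]) k = pvRevPairs c k := by
  induction k with
  | zero => rfl
  | succ k ih =>
      simp only [pvRevPairs]
      rw [ih (by omega)]
      rw [PySem.List.pyGet?_natCast, PySem.List.pyGet?_natCast]
      rw [List.getElem?_append_left (by omega)]

lemma pvEnum_rev (c : List String) :
    (PySem.List.enumerate c).reverse = pvRevPairs c c.length := by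
  induction c using List.reverseRecOn with
  | nil => rfl
  | append_singleton ys y ih =>
      rw [show PySem.List.enumerate (ys ++ [y]) = PySem.List.enumerate (ys ++ [y]) 0 from rfl]
      rw [pvEnum_append]
      simp only [List.reverse_append, PySem.List.enumerate_nil, PySem.List.enumerate_cons,
        List.reverse_cons, List.reverse_nil, List.nil_append, List.length_append,
        List.length_singleton]
      simp only [pvRevPairs]
      rw [pvRevPairs_append ys y ys.length le_rfl]
      rw [← ih]
      rw [PySem.List.pyGet?_natCast]
      simp

lemma pvFindCut_bounds (c : List String) (num : Int) (k : Nat) (cnt : Int) :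
    0 ≤ pvFindCut (pvDownIdxs k) c cnt num ∧ (pvFindCut (pvDownIdxs k) c cnt num).toNat ≤ k := by
  induction k generalizing cnt with
  | zero => simp [pvDownIdxs, pvFindCut]
  | succ k ih =>
      simp only [pvDownIdxs, pvFindCut]
      obtain ⟨h1, h2⟩ := ih (cnt + 1)
      obtain ⟨h3, h4⟩ := ih cnt
      split <;> split <;> constructor <;> omega

lemma pvMain (c : List String) (num : Int) (k : Nat) (hk : k ≤ c.length) :
    ∀ (removed : List String) (counter : Int),
    pvLoopA (pvRevPairs c k) (c.take k) removed counter num =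
      (c.take (pvFindCut (pvDownIdxs k) c counter num).toNat,
       removed ++ (((c.take k).drop (pvFindCut (pvDownIdxs k) c counter num).toNat).reverse.filter
         pvIsCode).map PySem.Str.strip) := by
  induction k with
  | zero =>
      intro removed counter
      simp [pvRevPairs, pvDownIdxs, pvLoopA, pvFindCut]
  | succ k ih =>
      intro removed counter
      have hlt : k < c.length := by omega
      set ck := (PySem.List.pyGet? c (k : Int)).getD "" with hck
      have htk : c.take (k + 1) = c.take k ++ [ck] := by
        rw [List.take_add_one, List.getElem?_eq_getElem hlt, hck,
            PySem.List.pyGet?_natCast, List.getElem?_eq_getElem hlt]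
        rfl
      have hltk : List.length (c.take k) = k := by simp [List.length_take]; omega
      have hget2 : (PySem.List.pyGet? (c.take (k + 1)) (k : Int)).getD "" = ck := by
        rw [PySem.List.pyGet?_natCast, List.getElem?_take, if_pos (by omega), hck,
            PySem.List.pyGet?_natCast]
      have hpop : ((PySem.List.pop? (c.take (k + 1)) (k : Int)).map Prod.snd).getD
          (c.take (k + 1)) = c.take k := by
        rw [PySem.List.pop?_natCast _ k (by simp; omega)]
        simp [List.eraseIdx_eq_take_drop_succ, List.take_take]
      have hdropk : (c.take (k + 1)).drop k = [ck] := by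
        rw [htk, List.drop_append_of_le_length (by omega)]
        simp [List.drop_eq_nil_of_le (by omega : (c.take k).length ≤ k)]
      simp only [pvRevPairs, pvDownIdxs, pvLoopA, pvFindCut, ← hck, hget2, hpop]
      by_cases hcode : pvIsCode ck = true
      · simp only [hcode, if_true]
        by_cases hbrk : counter + 1 = num
        · simp only [hbrk, if_true, Int.toNat_natCast, hdropk]
          simp [hcode]
        · simp only [if_neg hbrk]
          rw [ih (by omega) (removed ++ [PySem.Str.strip ck]) (counter + 1)]
          have hm := pvFindCut_bounds c num k (counter + 1)
          rw [htk, List.drop_append_of_le_length (by omega)]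
          simp [hcode]
      · simp only [hcode, if_false, Bool.false_eq_true]
        by_cases hbrk : counter = num
        · simp only [hbrk, if_true, Int.toNat_natCast, hdropk]
          simp [hcode]
        · simp only [if_neg hbrk]
          rw [ih (by omega) removed counter]
          have hm := pvFindCut_bounds c num k counter
          rw [htk, List.drop_append_of_le_length (by omega)]
          simp [hcode]

-- ===== VERDICT (by name: the statement is the Claim_ definition above) =====
theorem remove_last_lines_spec : Claim_equal_remove_last_lines := by
  intro program num_lines _
  unfold Spec_remove_last_lines remove_last_lines remove_last_lines_alt
  obtain ⟨h0, hlen⟩ := pvFindCut_bounds ((PySem.Str.split? program "\n").getD [])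
    num_lines ((PySem.Str.split? program "\n").getD []).length 0
  have hm := pvMain ((PySem.Str.split? program "\n").getD []) num_lines
    ((PySem.Str.split? program "\n").getD []).length le_rfl [] 0
  rw [List.take_length] at hm
  simp only [pvEnum_rev, pvRange_eq_downIdxs ((PySem.Str.split? program "\n").getD []).length]
  rw [hm, PySem.List.slice_to _ h0, PySem.List.slice_from _ h0]
  simp
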